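-- pv_equiv track=rewrite | github.com/1ce2k/iti0102-2023 | OP/op08_turtles/turtles.py | apply_dragon_rules
-- ===== SOURCE A (Python) =====
-- def apply_dragon_rules(string: str) -> str:
--     """
--     Write a recursive function that replaces characters in string.
--
--     Like so:
--         "a" -> "aRbFR"
--         "b" -> "LFaLb"
--     apply_dragon_rules("a") -> "aRbFR"
--     apply_dragon_rules("aa") -> "aRbFRaRbFR"
--     apply_dragon_rules("FRaFRb") -> "FRaRbFRFRLFaLb"
--
--     :param string: sentence with "a" and "b" characters that need to be replaced
--     :return: new sentence with "a" and "b" characters replaced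
--     """
--     if not string:
--         return ''
--     if string[0] == 'a':
--         return "aRbFR" + apply_dragon_rules(string[1:])
--     if string[0] == 'b':
--         return "LFaLb" + apply_dragon_rules(string[1:])
--     return string[0] + apply_dragon_rules(string[1:])
-- ===== SOURCE B (Python) =====
-- def apply_dragon_rules(string: str) -> str:
--     """Iterative rewrite: map each character through a rule table and join."""
--     mapping = {'a': 'aRbFR', 'b': 'LFaLb'}
--     parts = []
--     for ch in string:
--         parts.append(mapping.get(ch, ch))
--     return ''.join(parts)
-- ===== Notes on version B (the rewrite author's own statement) =====
-- stated objective: faster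
-- what changed: Replaces tail recursion on string[1:] (which rebuilds the tail and concatenates strings quadratically) with a single iterative pass that appends a rule-table lookup per character to a list and joins once.
import Mathlib
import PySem

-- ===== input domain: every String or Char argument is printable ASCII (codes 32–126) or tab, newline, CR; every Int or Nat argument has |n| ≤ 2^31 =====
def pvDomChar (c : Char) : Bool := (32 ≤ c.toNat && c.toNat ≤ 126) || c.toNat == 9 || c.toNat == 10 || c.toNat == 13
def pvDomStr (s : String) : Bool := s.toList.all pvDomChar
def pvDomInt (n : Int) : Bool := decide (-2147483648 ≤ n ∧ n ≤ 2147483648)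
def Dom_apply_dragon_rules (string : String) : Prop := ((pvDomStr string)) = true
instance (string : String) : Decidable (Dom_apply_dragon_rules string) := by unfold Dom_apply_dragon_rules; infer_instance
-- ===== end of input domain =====

-- B replaces A's tail recursion on string[1:] with one iterative pass that joins rule-table lookups (idiomatic).

-- ===== PORT A =====
-- A recurses on the characters of the string; ported as structural recursion over the char list.
def pvAGo (l : List Char) : List Char :=
  match l with
  | [] => []
  | c :: rest =>
    if c = 'a' then "aRbFR".toList ++ pvAGo rest
    else if c = 'b' then "LFaLb".toList ++ pvAGo rest
    else c :: pvAGo rest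

def apply_dragon_rules (string : String) : String :=
  String.ofList (pvAGo string.toList)

-- ===== PORT B =====
def pvMapping : PySem.Dict Char String := PySem.Dict.ofList [('a', "aRbFR"), ('b', "LFaLb")]

def apply_dragon_rules_alt (string : String) : String :=
  PySem.Str.join ""
    (string.toList.foldl (fun parts ch => parts ++ [PySem.Dict.getD pvMapping ch (String.ofList [ch])]) [])

-- ===== PRECONDITION & SPEC =====
def Spec_apply_dragon_rules (string : String) (out : String) : Prop := out = apply_dragon_rules_alt string
instance (string : String) (out : String) : Decidable (Spec_apply_dragon_rules string out) := by unfold Spec_apply_dragon_rules; infer_instance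

-- ===== CLAIM (what is proved, stated in full; the proofs are below) =====
def Claim_equal_apply_dragon_rules : Prop := ∀ (string : String), Dom_apply_dragon_rules string → Spec_apply_dragon_rules string (apply_dragon_rules string)

-- ===== LEMMAS AND PROOFS =====

theorem pv_join_nil_eq_flatten (parts : List (List Char)) :
    PySem.Chars.join [] parts = parts.flatten := by
  induction parts with
  | nil => simp [PySem.Chars.join, List.intercalate]
  | cons x rest ih =>
    cases rest with
    | nil => simp [PySem.Chars.join, List.intercalate]
    | cons y r =>
      simp only [PySem.Chars.join, List.intercalate] at *
      simp [List.intersperse] at *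
      simp [ih]

theorem pv_getD (c : Char) (d : String) :
    PySem.Dict.getD pvMapping c d = if c = 'a' then "aRbFR" else if c = 'b' then "LFaLb" else d := by
  have hm : pvMapping = PySem.Dict.mk [('a', "aRbFR"), ('b', "LFaLb")] := by rfl
  rw [hm]
  simp only [PySem.Dict.getD, PySem.Dict.get?_mk_cons]
  by_cases ha : c = 'a'
  · simp [ha]
  · by_cases hb : c = 'b'
    · simp [hb]
    · simp [ha, hb, Ne.symm ha, Ne.symm hb, PySem.Dict.get?]

theorem pv_fold_flatten (l : List Char) (acc : List String) :
    (((l.foldl (fun parts ch => parts ++ [PySem.Dict.getD pvMapping ch (String.ofList [ch])]) acc).map String.toList)).flatten = ((acc.map String.toList)).flatten ++ pvAGo l := by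
  induction l generalizing acc with
  | nil => simp [pvAGo]
  | cons c rest ih =>
    rw [List.foldl_cons, ih, List.map_append, List.flatten_append, List.append_assoc]
    by_cases ha : c = 'a'
    · subst ha; simp [pvAGo, pv_getD]
    · by_cases hb : c = 'b'
      · subst hb; simp [pvAGo, pv_getD, ha]
      · simp [pvAGo, pv_getD, ha, hb]

-- ===== VERDICT (by name: the statement is the Claim_ definition above) =====
theorem apply_dragon_rules_spec : Claim_equal_apply_dragon_rules := by
  intro s _
  unfold Spec_apply_dragon_rules apply_dragon_rules apply_dragon_rules_alt
  apply String.toList_injective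
  rw [PySem.Str.toList_join]
  have h := pv_fold_flatten s.toList []
  simp only [List.map_nil, List.flatten_nil, List.nil_append] at h
  rw [String.toList_empty, pv_join_nil_eq_flatten, h]
  simp
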